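-- pv_equiv track=rewrite | github.com/Jameshuff91/open-cure | scripts/h95_pathway_traversal.py | predict_drugs_for_disease
-- ===== SOURCE A (Python) =====
-- from typing import Dict, Set
--
-- def normalize_disease_id(disease_id: str) -> str:
--     """Extract MESH ID from drkg format."""
--     if "::" in disease_id:
--         return disease_id.split("::")[-1]
--     return disease_id
--
-- def predict_drugs_for_disease(
--     disease_id: str,
--     disease_pathways: Dict[str, list],
--     drug_pathways: Dict[str, list],
-- ) -> list:
--     """
--     Predict drugs for a disease using pathway overlap.
--
--     Returns list of (drug_id, score) tuples sorted by score descending.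
--     Score = number of shared KEGG pathways.
--     """
--     disease_mesh = normalize_disease_id(disease_id)
--
--     if disease_mesh not in disease_pathways:
--         return []
--
--     disease_pathway_set = set(disease_pathways[disease_mesh])
--
--     if not disease_pathway_set:
--         return []
--
--     # Score each drug by pathway overlap
--     drug_scores = []
--     for drug_id, drug_paths in drug_pathways.items():
--         drug_pathway_set = set(drug_paths)
--         overlap = disease_pathway_set & drug_pathway_set
--         if overlap:
--             drug_scores.append((drug_id, len(overlap)))
--
--     # Sort by score
--     drug_scores.sort(key=lambda x: -x[1])
--     return drug_scores
-- ===== SOURCE B (Python) =====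
-- def predict_drugs_for_disease(disease_id, disease_pathways, drug_pathways):
--     disease_mesh = disease_id.split("::")[-1] if "::" in disease_id else disease_id
--     disease_pathway_set = set(disease_pathways.get(disease_mesh, []))
--     if not disease_pathway_set:
--         return []
--     # Inverted index: pathway -> drug ids whose distinct pathway set contains it
--     index = {}
--     for drug_id, drug_paths in drug_pathways.items():
--         for p in set(drug_paths):
--             index.setdefault(p, []).append(drug_id)
--     # One counting pass over the disease pathway set
--     scores = {}
--     for p in disease_pathway_set:
--         for drug_id in index.get(p, []):
--             scores[drug_id] = scores.get(drug_id, 0) + 1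
--     # Emit in the dict's original insertion order; stable sort by descending score
--     ranked = [(d, scores.get(d, 0)) for d in drug_pathways if scores.get(d, 0) > 0]
--     return sorted(ranked, key=lambda x: -x[1])
-- ===== Notes on version B (the rewrite author's own statement) =====
-- stated objective: alternative
-- what changed: Replaced the per-drug set-intersection scan with an inverted index (pathway -> drug ids) plus a counting pass over the disease pathway set; the two early-return guards are merged into one via dict.get with a default, and the result is emitted by a list comprehension in insertion order then stably sorted by descending score.
import Mathlib
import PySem

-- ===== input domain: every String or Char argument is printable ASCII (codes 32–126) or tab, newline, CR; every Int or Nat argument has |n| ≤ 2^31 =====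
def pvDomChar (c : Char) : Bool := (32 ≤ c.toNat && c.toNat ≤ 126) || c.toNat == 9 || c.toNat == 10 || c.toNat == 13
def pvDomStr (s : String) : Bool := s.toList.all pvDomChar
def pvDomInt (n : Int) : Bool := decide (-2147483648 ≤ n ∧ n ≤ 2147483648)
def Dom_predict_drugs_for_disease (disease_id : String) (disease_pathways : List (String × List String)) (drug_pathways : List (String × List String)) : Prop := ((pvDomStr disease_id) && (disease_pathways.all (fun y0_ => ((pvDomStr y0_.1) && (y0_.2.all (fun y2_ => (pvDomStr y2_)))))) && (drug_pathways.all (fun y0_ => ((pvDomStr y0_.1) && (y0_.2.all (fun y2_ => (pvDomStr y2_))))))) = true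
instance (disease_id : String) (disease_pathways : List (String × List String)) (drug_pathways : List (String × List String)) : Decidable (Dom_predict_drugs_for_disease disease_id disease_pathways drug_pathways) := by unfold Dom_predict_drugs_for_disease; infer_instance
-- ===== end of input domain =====

-- B replaces A's per-drug set-intersection scan by an inverted index (pathway -> drug ids) and a
-- counting pass over the disease pathway set (objective: alternative algorithm, same cost class).

-- ===== PORT A =====
-- s.split("::")[-1]: split? is some for sep "::" ≠ "", and the result is nonempty, so [-1] is exactly getLastD
def predict_drugs_for_disease (disease_id : String) (disease_pathways : List (String × List String)) (drug_pathways : List (String × List String)) : List (String × Int) :=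
  let disease_mesh :=
    if PySem.Str.isIn "::" disease_id then ((PySem.Str.split? disease_id "::").getD []).getLastD ""
    else disease_id
  let dd := PySem.Dict.ofList disease_pathways
  if dd.contains disease_mesh = false then []
  else
    let dset : PySem.Set String := PySem.Set.ofList (dd.getD disease_mesh [])
    if dset = [] then []
    else
      let drug_scores := (PySem.Dict.ofList drug_pathways).items.foldl
        (fun acc p =>
          let drug_pathway_set : PySem.Set String := PySem.Set.ofList p.2
          let overlap := PySem.Set.inter dset drug_pathway_set
          if overlap ≠ [] then acc ++ [(p.1, (PySem.Set.len overlap : Int))] else acc) []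
      PySem.List.sorted drug_scores (fun x => -x.2) false

-- ===== PORT B =====
def predict_drugs_for_disease_alt (disease_id : String) (disease_pathways : List (String × List String)) (drug_pathways : List (String × List String)) : List (String × Int) :=
  let disease_mesh :=
    if PySem.Str.isIn "::" disease_id then ((PySem.Str.split? disease_id "::").getD []).getLastD ""
    else disease_id
  let disease_pathway_set : PySem.Set String :=
    PySem.Set.ofList ((PySem.Dict.ofList disease_pathways).getD disease_mesh [])
  if disease_pathway_set = [] then []
  else
    let gd := PySem.Dict.ofList drug_pathways
    -- index.setdefault(p, []).append(drug_id)
    let index := gd.items.foldl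
      (fun d q => (PySem.Set.ofList q.2).foldl (fun d' pw => d'.modify pw [] (· ++ [q.1])) d)
      PySem.Dict.empty
    -- scores[drug_id] = scores.get(drug_id, 0) + 1
    let scores : PySem.Dict String Int := disease_pathway_set.foldl
      (fun s pw => (index.getD pw []).foldl (fun s' dg => s'.insert dg (s'.getD dg 0 + 1)) s)
      PySem.Dict.empty
    -- [(d, scores.get(d, 0)) for d in drug_pathways if scores.get(d, 0) > 0]
    let ranked := gd.keys.filterMap
      (fun d => if scores.getD d 0 > 0 then some (d, scores.getD d 0) else none)
    PySem.List.sorted ranked (fun x => -x.2) false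

-- ===== PRECONDITION & SPEC =====
def Spec_predict_drugs_for_disease (disease_id : String) (disease_pathways : List (String × List String)) (drug_pathways : List (String × List String)) (out : List (String × Int)) : Prop := out = predict_drugs_for_disease_alt disease_id disease_pathways drug_pathways
instance (disease_id : String) (disease_pathways : List (String × List String)) (drug_pathways : List (String × List String)) (out : List (String × Int)) : Decidable (Spec_predict_drugs_for_disease disease_id disease_pathways drug_pathways out) := by unfold Spec_predict_drugs_for_disease; infer_instance

-- ===== CLAIM (what is proved, stated in full; the proofs are below) =====
def Claim_equal_predict_drugs_for_disease : Prop := ∀ (disease_id : String) (disease_pathways : List (String × List String)) (drug_pathways : List (String × List String)), Dom_predict_drugs_for_disease disease_id disease_pathways drug_pathways → Spec_predict_drugs_for_disease disease_id disease_pathways drug_pathways (predict_drugs_for_disease disease_id disease_pathways drug_pathways)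

-- ===== LEMMAS AND PROOFS =====

-- a Nodup list filtered for equality with c keeps exactly c (if present)
theorem filter_beq_of_nodup {α : Type} [DecidableEq α] (l : List α) (h : l.Nodup) (c : α) :
    l.filter (fun y => y == c) = if c ∈ l then [c] else [] := by
  induction l with
  | nil => simp
  | cons a t ih =>
    simp only [List.nodup_cons] at h
    by_cases hac : a = c
    · subst hac
      have h0 : t.filter (fun y => y == a) = [] := by
        rw [ih h.2]; simp [h.1]
      simp [h0]
    · simp [hac, ih h.2, Ne.symm hac]

-- a key absent from t never appears among the keys of a filtered t
theorem count_zero_filter_map {α : Type} [DecidableEq α] {β : Type} (t : List (α × β)) (b : α × β → Bool)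
    (x : α) (hx : x ∉ t.map (·.1)) : ((t.filter b).map (·.1)).count x = 0 := by
  rw [List.count_eq_zero]
  intro hmem
  exact hx (by
    rcases List.mem_map.mp hmem with ⟨q, hq, rfl⟩
    exact List.mem_map.mpr ⟨q, List.mem_of_mem_filter hq, rfl⟩)

-- with unique keys, p.1 occurs in the filtered key list exactly when p itself passes the filter
theorem count_key_filter {α : Type} (items : List (String × α)) (hk : (items.map (·.1)).Nodup)
    (p : String × α) (hp : p ∈ items) (b : String × α → Bool) :
    ((items.filter b).map (·.1)).count p.1 = if b p then 1 else 0 := by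
  induction items with
  | nil => cases hp
  | cons q t ih =>
    simp only [List.map_cons, List.nodup_cons] at hk
    rcases List.mem_cons.mp hp with rfl | hp
    · by_cases hb : b p
      · simp [hb, count_zero_filter_map t b p.1 hk.1]
      · simp [hb, count_zero_filter_map t b p.1 hk.1]
    · have hne : q.1 ≠ p.1 := by
        intro he; exact hk.1 (he ▸ List.mem_map.mpr ⟨p, hp, rfl⟩)
      by_cases hb : b q
      · simp [hb, hne, ih hk.2 hp]
      · simp [hb, ih hk.2 hp]

-- one drug's contribution to the inverted index, at an arbitrary key c
theorem index_step (d : PySem.Dict String (List String)) (p : String × List String) (c : String) :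
    ((PySem.Set.ofList p.2).foldl (fun d' pw => d'.modify pw [] (· ++ [p.1])) d).getD c []
      = d.getD c [] ++ (if (PySem.Set.ofList p.2).contains c then [p.1] else []) := by
  have h1 : ((PySem.Set.ofList p.2).map (fun pw => (pw, p.1))).foldl
      (fun d q => d.modify q.1 [] (· ++ [q.2])) d
      = (PySem.Set.ofList p.2).foldl (fun d' pw => d'.modify pw [] (· ++ [p.1])) d := by
    rw [List.foldl_map]
  rw [← h1, PySem.Dict.getD_foldl_modify_append]
  congr 1
  rw [List.filter_map, List.map_map]
  have h2 : ((PySem.Set.ofList p.2).filter ((fun q : String × String => q.1 == c) ∘ (fun pw => (pw, p.1))))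
      = (PySem.Set.ofList p.2).filter (fun y => y == c) := rfl
  rw [h2, filter_beq_of_nodup _ (PySem.Set.nodup_ofList p.2) c]
  by_cases hc : c ∈ p.2
  · simp [hc]
  · simp [hc]

-- the inverted index at key c lists exactly the drugs whose pathway set contains c, in items order
theorem index_getD (items : List (String × List String)) (d0 : PySem.Dict String (List String)) (c : String) :
    (items.foldl (fun d p => (PySem.Set.ofList p.2).foldl (fun d' pw => d'.modify pw [] (· ++ [p.1])) d) d0).getD c []
      = d0.getD c [] ++ (items.filter (fun p => (PySem.Set.ofList p.2).contains c)).map (·.1) := by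
  induction items generalizing d0 with
  | nil => simp
  | cons p t ih =>
    simp only [List.foldl_cons]
    rw [ih, index_step]
    by_cases hc : c ∈ p.2
    · simp [hc]
    · simp [hc]

-- the counting loop: score of dg = sum over pathways of dg's occurrences in the index lists
theorem scores_getD (dlist : List String) (index : PySem.Dict String (List String))
    (s0 : PySem.Dict String Int) (dg : String) :
    (dlist.foldl (fun s pw => (index.getD pw []).foldl (fun s' x => s'.insert x (s'.getD x 0 + 1)) s) s0).getD dg 0
      = s0.getD dg 0 + (dlist.map (fun pw => ((index.getD pw []).count dg : Int))).sum := by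
  induction dlist generalizing s0 with
  | nil => simp
  | cons pw t ih =>
    simp only [List.foldl_cons, List.map_cons, List.sum_cons]
    rw [ih, PySem.Dict.getD_foldl_insert_add_one]
    ring

-- B's final score of a drug p: the number of distinct disease pathways its pathway set contains
theorem score_eq (dset : List String) (items : List (String × List String))
    (hk : (items.map (·.1)).Nodup) (p : String × List String) (hp : p ∈ items) :
    (dset.foldl
        (fun s pw =>
          (((items.foldl (fun d q => (PySem.Set.ofList q.2).foldl (fun d' pw' => d'.modify pw' [] (· ++ [q.1])) d)
              PySem.Dict.empty).getD pw []).foldl (fun s' x => s'.insert x (s'.getD x (0:Int) + 1)) s))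
        PySem.Dict.empty).getD p.1 (0:Int)
      = ((dset.countP (fun pw => (PySem.Set.ofList p.2).contains pw) : Nat) : Int) := by
  rw [scores_getD, PySem.Dict.getD_empty]
  have hmap : (fun pw => (((items.foldl (fun d q => (PySem.Set.ofList q.2).foldl (fun d' pw' => d'.modify pw' [] (· ++ [q.1])) d)
              PySem.Dict.empty).getD pw []).count p.1 : Int))
      = fun pw => if (PySem.Set.ofList p.2).contains pw then (1:Int) else 0 := by
    funext pw
    rw [index_getD, PySem.Dict.getD_empty, List.nil_append,
      count_key_filter items hk p hp (fun q => (PySem.Set.ofList q.2).contains pw)]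
    split_ifs <;> simp
  rw [hmap, PySem.List.sum_map_ite_one_zero]
  simp
  refine List.countP_congr fun x _ => ?_
  simp [PySem.Set.contains_eq_listContains, PySem.Set.mem_ofList]

-- a foldl appending under an ite equals filter-then-map
theorem foldl_append_ite_map {α β : Type} (l : List α) (p : α → Prop) [DecidablePred p]
    (f : α → β) (acc : List β) :
    l.foldl (fun acc x => if p x then acc ++ [f x] else acc) acc
      = acc ++ (l.filter (fun x => decide (p x))).map f := by
  induction l generalizing acc with
  | nil => simp
  | cons a t ih =>
    by_cases h : p a
    · simp [h, ih]
    · simp [h, ih]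

-- a filterMap under an ite equals filter-then-map
theorem filterMap_ite_map {α β : Type} (l : List α) (p : α → Prop) [DecidablePred p]
    (f : α → β) :
    l.filterMap (fun x => if p x then some (f x) else none)
      = (l.filter (fun x => decide (p x))).map f := by
  induction l with
  | nil => simp
  | cons a t ih =>
    by_cases h : p a
    · simp [h, ih]
    · simp [h, ih]

-- A's emit fold equals B's emit comprehension over the keys
theorem emit_eq (dset : List String) (items : List (String × List String))
    (hk : (items.map (·.1)).Nodup) :
    items.foldl (fun acc p =>
        if PySem.Set.inter dset (PySem.Set.ofList p.2) ≠ [] then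
          acc ++ [(p.1, (PySem.Set.len (PySem.Set.inter dset (PySem.Set.ofList p.2)) : Int))]
        else acc) []
    = (items.map (·.1)).filterMap (fun d =>
        if (dset.foldl
              (fun s pw =>
                (((items.foldl (fun dct q => (PySem.Set.ofList q.2).foldl (fun d' pw' => d'.modify pw' [] (· ++ [q.1])) dct)
                    PySem.Dict.empty).getD pw []).foldl (fun s' x => s'.insert x (s'.getD x (0:Int) + 1)) s))
              PySem.Dict.empty).getD d (0:Int) > 0 then
          some (d, (dset.foldl
              (fun s pw =>
                (((items.foldl (fun dct q => (PySem.Set.ofList q.2).foldl (fun d' pw' => d'.modify pw' [] (· ++ [q.1])) dct)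
                    PySem.Dict.empty).getD pw []).foldl (fun s' x => s'.insert x (s'.getD x (0:Int) + 1)) s))
              PySem.Dict.empty).getD d (0:Int))
        else none) := by
  rw [List.filterMap_map, foldl_append_ite_map, List.nil_append]
  have hfm : ∀ x : String × List String,
      ((fun d => if (dset.foldl
              (fun s pw =>
                (((items.foldl (fun dct q => (PySem.Set.ofList q.2).foldl (fun d' pw' => d'.modify pw' [] (· ++ [q.1])) dct)
                    PySem.Dict.empty).getD pw []).foldl (fun s' x => s'.insert x (s'.getD x (0:Int) + 1)) s))
              PySem.Dict.empty).getD d (0:Int) > 0 then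
          some (d, (dset.foldl
              (fun s pw =>
                (((items.foldl (fun dct q => (PySem.Set.ofList q.2).foldl (fun d' pw' => d'.modify pw' [] (· ++ [q.1])) dct)
                    PySem.Dict.empty).getD pw []).foldl (fun s' x => s'.insert x (s'.getD x (0:Int) + 1)) s))
              PySem.Dict.empty).getD d (0:Int))
        else none) ∘ (·.1)) x
      = (fun p : String × List String => if (dset.foldl
              (fun s pw =>
                (((items.foldl (fun dct q => (PySem.Set.ofList q.2).foldl (fun d' pw' => d'.modify pw' [] (· ++ [q.1])) dct)
                    PySem.Dict.empty).getD pw []).foldl (fun s' x => s'.insert x (s'.getD x (0:Int) + 1)) s))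
              PySem.Dict.empty).getD p.1 (0:Int) > 0 then
          some (p.1, (dset.foldl
              (fun s pw =>
                (((items.foldl (fun dct q => (PySem.Set.ofList q.2).foldl (fun d' pw' => d'.modify pw' [] (· ++ [q.1])) dct)
                    PySem.Dict.empty).getD pw []).foldl (fun s' x => s'.insert x (s'.getD x (0:Int) + 1)) s))
              PySem.Dict.empty).getD p.1 (0:Int))
        else none) x := fun x => rfl
  rw [funext hfm, filterMap_ite_map]
  -- now both sides are filter-then-map; compare pointwise on members using score_eq
  have hlen : ∀ p : String × List String, PySem.Set.len (PySem.Set.inter dset (PySem.Set.ofList p.2))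
      = ((dset.countP (fun pw => (PySem.Set.ofList p.2).contains pw) : Nat) : Int) := by
    intro p
    simp only [PySem.Set.len, PySem.Set.inter]
    rw [← List.countP_eq_length_filter]
  have hfilter : items.filter (fun p => decide (PySem.Set.inter dset (PySem.Set.ofList p.2) ≠ []))
      = items.filter (fun p => decide ((dset.foldl
              (fun s pw =>
                (((items.foldl (fun dct q => (PySem.Set.ofList q.2).foldl (fun d' pw' => d'.modify pw' [] (· ++ [q.1])) dct)
                    PySem.Dict.empty).getD pw []).foldl (fun s' x => s'.insert x (s'.getD x (0:Int) + 1)) s))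
              PySem.Dict.empty).getD p.1 (0:Int) > 0)) := by
    refine List.filter_congr fun p hp => ?_
    rw [score_eq dset items hk p hp]
    have key : PySem.Set.inter dset (PySem.Set.ofList p.2) ≠ []
        ↔ ((dset.countP (fun pw => (PySem.Set.ofList p.2).contains pw) : Nat) : Int) > 0 := by
      rw [← hlen p]
      simp only [PySem.Set.len, gt_iff_lt]
      constructor
      · intro h
        exact_mod_cast List.length_pos_of_ne_nil h
      · intro h hnil
        rw [hnil] at h
        simp at h
    simp only [decide_eq_decide]
    exact key
  rw [hfilter]
  refine List.map_congr_left fun p hp => ?_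
  have hp' : p ∈ items := List.mem_of_mem_filter hp
  rw [score_eq dset items hk p hp', hlen p]

theorem main_eq (i : String) (dp gp : List (String × List String)) :
    predict_drugs_for_disease i dp gp = predict_drugs_for_disease_alt i dp gp := by
  unfold predict_drugs_for_disease predict_drugs_for_disease_alt
  simp only []
  generalize (if PySem.Str.isIn "::" i then ((PySem.Str.split? i "::").getD []).getLastD "" else i) = m
  by_cases hc : (PySem.Dict.ofList dp).contains m = false
  · -- A returns [] via the contains guard; B sees getD m [] = [], so its dset is empty too
    have hget : (PySem.Dict.ofList dp).getD m [] = [] := by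
      have := (PySem.Dict.get?_eq_none_iff_contains (PySem.Dict.ofList dp) m).mpr hc
      simp [PySem.Dict.getD, this]
    simp [hc, hget, PySem.Set.ofList]
  · rw [if_neg hc]
    by_cases he : (PySem.Set.ofList ((PySem.Dict.ofList dp).getD m []) : PySem.Set String) = []
    · simp [he]
    · rw [if_neg he, if_neg he]
      congr 1
      have hk : (((PySem.Dict.ofList gp).items.map (·.1)).Nodup) := PySem.Dict.nodup_keys_ofList gp
      have := emit_eq (PySem.Set.ofList ((PySem.Dict.ofList dp).getD m [])) (PySem.Dict.ofList gp).items hk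
      exact this

-- ===== VERDICT (by name: the statement is the Claim_ definition above) =====
theorem predict_drugs_for_disease_spec : Claim_equal_predict_drugs_for_disease := by
  intro disease_id disease_pathways drug_pathways _
  exact main_eq disease_id disease_pathways drug_pathways
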